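-- pv_equiv track=rewrite | github.com/dkm1006/AoC | day14/polymer.py | apply_insertion_rules
-- ===== SOURCE A (Python) =====
-- def apply_insertion_rules(pair_vec, integer_insertion_rules):
--     result_vec = pair_vec[:]
--     for index, num_pairs in enumerate(pair_vec):
--         result_vec[index] -= num_pairs
--         left_insert_index, right_insert_index = integer_insertion_rules[index]
--         result_vec[left_insert_index] += num_pairs
--         result_vec[right_insert_index] += num_pairs
--
--     return result_vec
-- ===== SOURCE B (Python) =====
-- def apply_insertion_rules(pair_vec, integer_insertion_rules):
--     n = len(pair_vec)
--     incoming = [[] for _ in range(n)]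
--     for j in range(n):
--         left, right = integer_insertion_rules[j]
--         incoming[left].append(j)
--         incoming[right].append(j)
--     return [sum(pair_vec[j] for j in incoming[k]) for k in range(n)]
-- ===== Notes on version B (the rewrite author's own statement) =====
-- stated objective: alternative
-- what changed: B replaces A's scatter loop (copy the vector, then for each source pair subtract its count and add it at the two rule targets) by a destination-indexed gather: it first builds a reverse table 'incoming' mapping each target slot to the source indices that feed it (appended twice when both rule endpoints coincide), then produces each output entry as a sum over its incoming sources, so the cancelling copy-then-subtract disappears.
import Mathlib
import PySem

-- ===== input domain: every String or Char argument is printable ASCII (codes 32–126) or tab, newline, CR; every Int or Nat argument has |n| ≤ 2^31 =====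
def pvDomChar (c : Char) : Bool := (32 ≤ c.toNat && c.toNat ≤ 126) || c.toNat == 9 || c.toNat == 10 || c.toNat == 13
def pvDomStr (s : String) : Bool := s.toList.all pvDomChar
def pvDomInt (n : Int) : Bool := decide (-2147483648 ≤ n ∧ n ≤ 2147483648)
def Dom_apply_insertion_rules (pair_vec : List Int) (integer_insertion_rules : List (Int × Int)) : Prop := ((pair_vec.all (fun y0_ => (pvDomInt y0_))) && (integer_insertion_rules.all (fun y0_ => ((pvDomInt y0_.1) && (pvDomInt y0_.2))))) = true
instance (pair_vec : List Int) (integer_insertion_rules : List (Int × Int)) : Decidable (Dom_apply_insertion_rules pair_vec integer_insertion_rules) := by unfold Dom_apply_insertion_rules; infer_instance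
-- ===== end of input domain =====

-- B gathers per destination through a precomputed reverse table instead of A's scatter
-- with a cancelling copy; same O(n) cost, different decomposition (objective: alternative).

-- ===== PORT A =====
-- loop body of A's 'for index, num_pairs in enumerate(pair_vec)'
def pvStepA (rules : List (Int × Int)) (result_vec : List Int) (iv : Int × Int) : List Int :=
  let r1 := PySem.List.pySetD result_vec iv.1 (PySem.List.pyGetD result_vec iv.1 0 - iv.2)
  let lr := PySem.List.pyGetD rules iv.1 ((0 : Int), (0 : Int))
  let r2 := PySem.List.pySetD r1 lr.1 (PySem.List.pyGetD r1 lr.1 0 + iv.2)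
  PySem.List.pySetD r2 lr.2 (PySem.List.pyGetD r2 lr.2 0 + iv.2)

def apply_insertion_rules (pair_vec : List Int) (integer_insertion_rules : List (Int × Int)) : List Int :=
  (PySem.List.enumerate pair_vec).foldl (pvStepA integer_insertion_rules) pair_vec

-- ===== PORT B =====
-- loop body of B's 'for j in range(n)': append j to incoming[left] and incoming[right]
def pvStepB (rules : List (Int × Int)) (incoming : List (List Int)) (j : Int) : List (List Int) :=
  let lr := PySem.List.pyGetD rules j ((0 : Int), (0 : Int))
  let inc1 := PySem.List.pySetD incoming lr.1 (PySem.List.pyGetD incoming lr.1 [] ++ [j])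
  PySem.List.pySetD inc1 lr.2 (PySem.List.pyGetD inc1 lr.2 [] ++ [j])

def apply_insertion_rules_alt (pair_vec : List Int) (integer_insertion_rules : List (Int × Int)) : List Int :=
  let n := pair_vec.length
  let incoming := (PySem.List.pyRange 0 (n : Int)).foldl (pvStepB integer_insertion_rules)
    (List.replicate n ([] : List Int))
  (PySem.List.pyRange 0 (n : Int)).map (fun k =>
    ((PySem.List.pyGetD incoming k []).map (fun j => PySem.List.pyGetD pair_vec j 0)).sum)

-- ===== PRECONDITION & SPEC =====
-- Pre_ is exactly where Python A returns: the rule table covers every pair index and each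
-- rule endpoint used is a valid (possibly negative) Python index into the vector;
-- otherwise A raises IndexError.
def Pre_apply_insertion_rules (pair_vec : List Int) (integer_insertion_rules : List (Int × Int)) : Prop :=
  pair_vec.length ≤ integer_insertion_rules.length ∧
  ∀ j < pair_vec.length,
    (-(pair_vec.length : Int) ≤ (integer_insertion_rules.getD j (0, 0)).1 ∧
      (integer_insertion_rules.getD j (0, 0)).1 < (pair_vec.length : Int)) ∧
    (-(pair_vec.length : Int) ≤ (integer_insertion_rules.getD j (0, 0)).2 ∧
      (integer_insertion_rules.getD j (0, 0)).2 < (pair_vec.length : Int))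

instance (pair_vec : List Int) (integer_insertion_rules : List (Int × Int)) : Decidable (Pre_apply_insertion_rules pair_vec integer_insertion_rules) := by
  unfold Pre_apply_insertion_rules; infer_instance

def pvWitness_apply_insertion_rules : List Int × (List (Int × Int)) :=
  ([3, 1, 4], [(0, 1), (-1, 2), (2, -3)])

def Spec_apply_insertion_rules (pair_vec : List Int) (integer_insertion_rules : List (Int × Int)) (out : List Int) : Prop := out = apply_insertion_rules_alt pair_vec integer_insertion_rules
instance (pair_vec : List Int) (integer_insertion_rules : List (Int × Int)) (out : List Int) : Decidable (Spec_apply_insertion_rules pair_vec integer_insertion_rules out) := by unfold Spec_apply_insertion_rules; infer_instance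

-- ===== CLAIM (what is proved, stated in full; the proofs are below) =====
def Claim_equal_apply_insertion_rules : Prop := ∀ (pair_vec : List Int) (integer_insertion_rules : List (Int × Int)), Dom_apply_insertion_rules pair_vec integer_insertion_rules → Pre_apply_insertion_rules pair_vec integer_insertion_rules → Spec_apply_insertion_rules pair_vec integer_insertion_rules (apply_insertion_rules pair_vec integer_insertion_rules)

-- ===== LEMMAS AND PROOFS =====

-- Python's normalised index for a list of length n (valid when -n ≤ i < n)
def pvNorm (n : Nat) (i : Int) : Nat := if 0 ≤ i then i.toNat else n - (-i).toNat

theorem pvIdx?_eq (n : Nat) (i : Int) (h1 : -(n : Int) ≤ i) (h2 : i < (n : Int)) :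
    PySem.List.pyIdx? n i = some (pvNorm n i) := by
  simp only [PySem.List.pyIdx?, pvNorm]
  split_ifs with h <;> simp_all

theorem pvGetD_eq {α : Type} (xs : List α) (i : Int) (d : α)
    (h1 : -(xs.length : Int) ≤ i) (h2 : i < (xs.length : Int)) :
    PySem.List.pyGetD xs i d = xs.getD (pvNorm xs.length i) d := by
  simp only [PySem.List.pyGetD, PySem.List.pyGet?, pvIdx?_eq xs.length i h1 h2]
  simp [List.getD]

theorem pvSetD_eq {α : Type} (xs : List α) (i : Int) (v : α)
    (h1 : -(xs.length : Int) ≤ i) (h2 : i < (xs.length : Int)) :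
    PySem.List.pySetD xs i v = xs.set (pvNorm xs.length i) v := by
  simp [PySem.List.pySetD, PySem.List.pySet?, pvIdx?_eq xs.length i h1 h2]

theorem pvGetD_set {α : Type} (xs : List α) (m k : Nat) (v d : α) (hk : k < xs.length) :
    (xs.set m v).getD k d = if m = k then v else xs.getD k d := by
  simp only [List.getD, List.getElem?_set]
  split_ifs with h <;> simp_all

-- effect of one Python-style in-range update on one slot
theorem pvGetD_pySetD {α : Type} (xs : List α) (q : Int) (v d : α) (k : Nat)
    (hk : k < xs.length) (h1 : -(xs.length : Int) ≤ q) (h2 : q < (xs.length : Int)) :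
    (PySem.List.pySetD xs q v).getD k d = if pvNorm xs.length q = k then v else xs.getD k d := by
  rw [pvSetD_eq xs q v h1 h2, pvGetD_set xs _ k v d hk]

-- contribution of source index j to destination slot k (both rule endpoints)
def pvContrib (pv : List Int) (rules : List (Int × Int)) (k j : Nat) : Int :=
  (if pvNorm pv.length (rules.getD j (0, 0)).1 = k then pv.getD j 0 else 0) +
  (if pvNorm pv.length (rules.getD j (0, 0)).2 = k then pv.getD j 0 else 0)

-- ---- A-side loop invariant ----
theorem pvFoldA (rules : List (Int × Int)) (es : List (Int × Int)) (res : List Int)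
    (hb : ∀ p ∈ es, 0 ≤ p.1 ∧ p.1 < (res.length : Int) ∧ p.1 < (rules.length : Int) ∧
      (-(res.length : Int) ≤ (rules.getD p.1.toNat (0, 0)).1 ∧
        (rules.getD p.1.toNat (0, 0)).1 < (res.length : Int)) ∧
      (-(res.length : Int) ≤ (rules.getD p.1.toNat (0, 0)).2 ∧
        (rules.getD p.1.toNat (0, 0)).2 < (res.length : Int))) :
    (es.foldl (pvStepA rules) res).length = res.length ∧
    ∀ k < res.length, (es.foldl (pvStepA rules) res).getD k 0 =
      res.getD k 0 + (es.map (fun p =>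
        (if pvNorm res.length (rules.getD p.1.toNat (0, 0)).1 = k then p.2 else 0) +
        (if pvNorm res.length (rules.getD p.1.toNat (0, 0)).2 = k then p.2 else 0) -
        (if p.1.toNat = k then p.2 else 0))).sum := by
  induction es generalizing res with
  | nil => simp
  | cons p es ih =>
    obtain ⟨hp0, hp1, hpr, hL, hR⟩ := hb p (List.mem_cons_self ..)
    -- length bookkeeping for the three updates
    have hlen1 : (PySem.List.pySetD res p.1 (PySem.List.pyGetD res p.1 0 - p.2)).length = res.length :=
      PySem.List.length_pySetD ..
    have hstep_len : (pvStepA rules res p).length = res.length := by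
      simp [pvStepA, PySem.List.length_pySetD]
    have hget : PySem.List.pyGetD rules p.1 ((0 : Int), (0 : Int)) = rules.getD p.1.toNat (0, 0) := by
      rw [pvGetD_eq rules p.1 _ (by omega) hpr]
      have : pvNorm rules.length p.1 = p.1.toNat := by unfold pvNorm; simp [hp0]
      rw [this]
    have hstep : ∀ k < res.length, (pvStepA rules res p).getD k 0 =
        res.getD k 0 +
        ((if pvNorm res.length (rules.getD p.1.toNat (0, 0)).1 = k then p.2 else 0) +
         (if pvNorm res.length (rules.getD p.1.toNat (0, 0)).2 = k then p.2 else 0) -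
         (if p.1.toNat = k then p.2 else 0)) := by
      intro k hk
      simp only [pvStepA, hget]
      set q1 := (rules.getD p.1.toNat (0, 0)).1 with hq1
      set q2 := (rules.getD p.1.toNat (0, 0)).2 with hq2
      set r1 := PySem.List.pySetD res p.1 (PySem.List.pyGetD res p.1 0 - p.2) with hr1
      set r2 := PySem.List.pySetD r1 q1 (PySem.List.pyGetD r1 q1 0 + p.2) with hr2
      have hlen2 : r2.length = res.length := by
        rw [hr2, PySem.List.length_pySetD, hlen1]
      have hnp : pvNorm res.length p.1 = p.1.toNat := by unfold pvNorm; simp [hp0]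
      -- r1 values
      have hval1 : ∀ m < res.length, r1.getD m 0 =
          res.getD m 0 + (if p.1.toNat = m then -p.2 else 0) := by
        intro m hm
        rw [hr1, pvGetD_pySetD res p.1 _ 0 m hm (by omega) hp1,
          pvGetD_eq res p.1 0 (by omega) hp1, hnp]
        split_ifs <;> [skip; ring] <;> subst_vars <;> ring
      -- r2 values
      have hval2 : ∀ m < res.length, r2.getD m 0 =
          r1.getD m 0 + (if pvNorm res.length q1 = m then p.2 else 0) := by
        intro m hm
        rw [hr2]
        have h1 : -(r1.length : Int) ≤ q1 := by rw [hlen1]; exact hL.1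
        have h2 : q1 < (r1.length : Int) := by rw [hlen1]; exact hL.2
        rw [pvGetD_pySetD r1 q1 _ 0 m (by omega) h1 h2, pvGetD_eq r1 q1 0 h1 h2]
        have : pvNorm r1.length q1 = pvNorm res.length q1 := by rw [hlen1]
        rw [this]
        split_ifs <;> [skip; ring] <;> subst_vars <;> ring
      -- final values
      have h1 : -(r2.length : Int) ≤ q2 := by rw [hlen2]; exact hR.1
      have h2 : q2 < (r2.length : Int) := by rw [hlen2]; exact hR.2
      rw [pvGetD_pySetD r2 q2 _ 0 k (by omega) h1 h2, pvGetD_eq r2 q2 0 h1 h2]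
      have hn2 : pvNorm r2.length q2 = pvNorm res.length q2 := by rw [hlen2]
      rw [hn2]
      by_cases hc : pvNorm res.length q2 = k
      · simp only [hc, if_true]
        rw [hval2 k hk, hval1 k hk]
        split_ifs <;> ring
      · simp only [hc, if_false]
        rw [hval2 k hk, hval1 k hk]
        split_ifs <;> ring
    -- apply IH on the updated vector
    have hb' : ∀ p' ∈ es, 0 ≤ p'.1 ∧ p'.1 < ((pvStepA rules res p).length : Int) ∧
        p'.1 < (rules.length : Int) ∧
        (-(((pvStepA rules res p).length : Nat) : Int) ≤ (rules.getD p'.1.toNat (0, 0)).1 ∧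
          (rules.getD p'.1.toNat (0, 0)).1 < ((pvStepA rules res p).length : Int)) ∧
        (-(((pvStepA rules res p).length : Nat) : Int) ≤ (rules.getD p'.1.toNat (0, 0)).2 ∧
          (rules.getD p'.1.toNat (0, 0)).2 < ((pvStepA rules res p).length : Int)) := by
      intro p' hp'
      rw [hstep_len]
      exact hb p' (List.mem_cons_of_mem _ hp')
    obtain ⟨ihlen, ihval⟩ := ih (pvStepA rules res p) hb'
    constructor
    · simp only [List.foldl_cons]
      rw [ihlen, hstep_len]
    · intro k hk
      simp only [List.foldl_cons, List.map_cons, List.sum_cons]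
      rw [ihval k (by rw [hstep_len]; exact hk), hstep k hk, hstep_len]
      ring

-- ---- B-side loop invariant ----
theorem pvFoldB (pv : List Int) (rules : List (Int × Int)) (m : Nat) (hm : m ≤ pv.length)
    (hpre : Pre_apply_insertion_rules pv rules) :
    ((List.range m).foldl (fun inc (j : Nat) => pvStepB rules inc (j : Int))
      (List.replicate pv.length ([] : List Int))).length = pv.length ∧
    ∀ k < pv.length,
      ((((List.range m).foldl (fun inc (j : Nat) => pvStepB rules inc (j : Int))
        (List.replicate pv.length ([] : List Int))).getD k []).map
          (fun j => PySem.List.pyGetD pv j 0)).sum =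
      ((List.range m).map (pvContrib pv rules k)).sum := by
  induction m with
  | zero => simp
  | succ m ih =>
    obtain ⟨ihlen, ihval⟩ := ih (by omega)
    set inc := (List.range m).foldl (fun inc (j : Nat) => pvStepB rules inc (j : Int))
      (List.replicate pv.length ([] : List Int)) with hinc
    have hstep : (List.range (m + 1)).foldl (fun inc (j : Nat) => pvStepB rules inc (j : Int))
        (List.replicate pv.length ([] : List Int)) = pvStepB rules inc ((m : Nat) : Int) := by
      rw [List.range_succ, List.foldl_append, List.foldl_cons, List.foldl_nil]
    obtain ⟨hrlen, hrbnd⟩ := hpre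
    obtain ⟨hL, hR⟩ := hrbnd m (by omega)
    have hget : PySem.List.pyGetD rules ((m : Nat) : Int) ((0 : Int), (0 : Int)) =
        rules.getD m (0, 0) := PySem.List.pyGetD_natCast ..
    set q1 := (rules.getD m (0, 0)).1 with hq1
    set q2 := (rules.getD m (0, 0)).2 with hq2
    set inc1 := PySem.List.pySetD inc q1 (PySem.List.pyGetD inc q1 [] ++ [((m : Nat) : Int)]) with hinc1
    have hlen1 : inc1.length = pv.length := by rw [hinc1, PySem.List.length_pySetD, ihlen]
    have hstepB : pvStepB rules inc ((m : Nat) : Int) =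
        PySem.List.pySetD inc1 q2 (PySem.List.pyGetD inc1 q2 [] ++ [((m : Nat) : Int)]) := by
      simp only [pvStepB, hget]
      rfl
    have hL1 : -(inc.length : Int) ≤ q1 := by rw [ihlen]; exact hL.1
    have hL2 : q1 < (inc.length : Int) := by rw [ihlen]; exact hL.2
    have hR1 : -(inc1.length : Int) ≤ q2 := by rw [hlen1]; exact hR.1
    have hR2 : q2 < (inc1.length : Int) := by rw [hlen1]; exact hR.2
    have hval1 : ∀ k < pv.length, inc1.getD k [] =
        inc.getD k [] ++ (if pvNorm pv.length q1 = k then [((m : Nat) : Int)] else []) := by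
      intro k hk
      rw [hinc1, pvGetD_pySetD inc q1 _ [] k (by omega) hL1 hL2,
        pvGetD_eq inc q1 [] hL1 hL2, ihlen]
      split_ifs with h
      · rw [h]
      · simp
    constructor
    · rw [hstep, hstepB, PySem.List.length_pySetD, hlen1]
    · intro k hk
      rw [hstep, hstepB]
      have hkey : (PySem.List.pySetD inc1 q2
          (PySem.List.pyGetD inc1 q2 [] ++ [((m : Nat) : Int)])).getD k [] =
          inc1.getD k [] ++ (if pvNorm pv.length q2 = k then [((m : Nat) : Int)] else []) := by
        rw [pvGetD_pySetD inc1 q2 _ [] k (by omega) hR1 hR2,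
          pvGetD_eq inc1 q2 [] hR1 hR2, hlen1]
        split_ifs with h
        · rw [h]
        · simp
      rw [hkey, hval1 k hk, List.range_succ, List.map_append, List.sum_append]
      simp only [List.map_append, List.sum_append]
      rw [ihval k hk]
      have hmv : PySem.List.pyGetD pv ((m : Nat) : Int) 0 = pv.getD m 0 :=
        PySem.List.pyGetD_natCast ..
      simp only [List.map_cons, List.map_nil, List.sum_cons, List.sum_nil, pvContrib,
        ← hq1, ← hq2]
      split_ifs <;> simp <;> ring

-- single-spike sum over a range
theorem pvSpike (n k : Nat) (f : Nat → Int) (hk : k < n) :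
    ((List.range n).map (fun j => if j = k then f j else 0)).sum = f k := by
  induction n with
  | zero => omega
  | succ n ih =>
    rw [List.range_succ, List.map_append, List.sum_append]
    by_cases h : k = n
    · subst h
      have hz : ((List.range k).map (fun j => if j = k then f j else 0)).sum = 0 := by
        apply List.sum_eq_zero
        intro x hx
        simp only [List.mem_map, List.mem_range] at hx
        obtain ⟨j, hj, rfl⟩ := hx
        simp [Nat.ne_of_lt hj]
      simp [hz]
    · rw [ih (by omega)]
      have hnk : n ≠ k := fun hh => h hh.symm
      simp [hnk]

-- A's result, slot by slot: pure incoming contributions (the copy and the subtraction cancel)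
theorem pvA_char (pv : List Int) (rules : List (Int × Int))
    (hpre : Pre_apply_insertion_rules pv rules) :
    (apply_insertion_rules pv rules).length = pv.length ∧
    ∀ k < pv.length, (apply_insertion_rules pv rules).getD k 0 =
      ((List.range pv.length).map (pvContrib pv rules k)).sum := by
  obtain ⟨hrlen, hrbnd⟩ := hpre
  have henum : PySem.List.enumerate pv =
      (List.range pv.length).map (fun j => (((j : Nat) : Int), pv.getD j 0)) := by
    rw [PySem.List.enumerate_eq_map_pyRange pv 0, PySem.List.len_eq,
      PySem.List.pyRange_zero_natCast, List.map_map]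
    apply List.map_congr_left
    intro j hj
    simp [PySem.List.pyGetD_natCast]
  set es := (List.range pv.length).map (fun j => (((j : Nat) : Int), pv.getD j 0)) with hes
  have hb : ∀ p ∈ es, 0 ≤ p.1 ∧ p.1 < (pv.length : Int) ∧ p.1 < (rules.length : Int) ∧
      (-(pv.length : Int) ≤ (rules.getD p.1.toNat (0, 0)).1 ∧
        (rules.getD p.1.toNat (0, 0)).1 < (pv.length : Int)) ∧
      (-(pv.length : Int) ≤ (rules.getD p.1.toNat (0, 0)).2 ∧
        (rules.getD p.1.toNat (0, 0)).2 < (pv.length : Int)) := by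
    intro p hp
    simp only [hes, List.mem_map, List.mem_range] at hp
    obtain ⟨j, hj, rfl⟩ := hp
    have hbnd := hrbnd j hj
    simp only [Int.toNat_natCast]
    exact ⟨by omega, by omega, by omega, hbnd.1, hbnd.2⟩
  obtain ⟨hlen, hval⟩ := pvFoldA rules es pv hb
  have hA : apply_insertion_rules pv rules = es.foldl (pvStepA rules) pv := by
    rw [apply_insertion_rules, henum]
  constructor
  · rw [hA, hlen]
  · intro k hk
    rw [hA, hval k hk]
    rw [hes, List.map_map]
    have hcg : ∀ j ∈ List.range pv.length,
        ((fun p : Int × Int =>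
          (if pvNorm pv.length (rules.getD p.1.toNat (0, 0)).1 = k then p.2 else 0) +
          (if pvNorm pv.length (rules.getD p.1.toNat (0, 0)).2 = k then p.2 else 0) -
          (if p.1.toNat = k then p.2 else 0)) ∘
          (fun j => (((j : Nat) : Int), pv.getD j 0))) j =
        pvContrib pv rules k j + (if j = k then -(pv.getD j 0) else 0) := by
      intro j hj
      simp only [Function.comp, Int.toNat_natCast, pvContrib]
      split_ifs <;> ring
    rw [List.map_congr_left hcg, PySem.List.sum_map_add_int,
      pvSpike pv.length k (fun j => -(pv.getD j 0)) hk]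
    ring

-- B's result: the per-destination gather computes the same contribution sums
theorem pvB_char (pv : List Int) (rules : List (Int × Int))
    (hpre : Pre_apply_insertion_rules pv rules) :
    apply_insertion_rules_alt pv rules =
      (List.range pv.length).map
        (fun k => ((List.range pv.length).map (pvContrib pv rules k)).sum) := by
  obtain ⟨hlen, hval⟩ := pvFoldB pv rules pv.length le_rfl hpre
  show ((PySem.List.pyRange 0 (pv.length : Int)).map (fun k =>
      ((PySem.List.pyGetD ((PySem.List.pyRange 0 (pv.length : Int)).foldl
        (pvStepB rules) (List.replicate pv.length [])) k []).map
        (fun j => PySem.List.pyGetD pv j 0)).sum)) = _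
  rw [PySem.List.pyRange_zero_natCast, List.foldl_map, List.map_map]
  apply List.map_congr_left
  intro k hk
  simp only [Function.comp]
  rw [PySem.List.pyGetD_natCast]
  exact hval k (List.mem_range.mp hk)

-- ===== VERDICT (by name: the statement is the Claim_ definition above) =====
theorem apply_insertion_rules_spec : Claim_equal_apply_insertion_rules := by
  intro pv rules _ hpre
  unfold Spec_apply_insertion_rules
  obtain ⟨hAlen, hAval⟩ := pvA_char pv rules hpre
  rw [pvB_char pv rules hpre]
  apply List.ext_getElem
  · simp [hAlen]
  · intro k hk1 hk2
    have hk : k < pv.length := by rw [← hAlen]; exact hk1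
    rw [List.getElem_map, ← List.getD_eq_getElem (apply_insertion_rules pv rules) 0 hk1,
      hAval k hk]
    congr 1
    simp
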